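-- pv_equiv track=rewrite | github.com/jessica-writes-code/Advent-of-Code | AoC_2019/Problem4/solver.py | has_n_adjacent_digits
-- ===== SOURCE A (Python) =====
-- from typing import List, Optional
--
-- def has_n_adjacent_digits(number: int, n_digits: Optional[int] = None):
--     """Determines whether a number has exactly N adjacent digits that are
--     the same. If no value `n_digits` is provided, determines whether a number
--     has any adjacent digits that are the same."""
--     str_number = str(number)
--     num_parts = []
--
--     for i in str_number:
--         if len(num_parts) == 0:
--             num_parts.append(i)
--         elif num_parts[-1][-1] == i:
--             num_parts[-1] += i
--         else:
--             num_parts.append(i)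
--
--     num_part_lengths = [len(x) for x in num_parts]
--
--     if n_digits:
--         return any([x == n_digits for x in num_part_lengths])
--     else:
--         return any([x > 1 for x in num_part_lengths])
-- ===== SOURCE B (Python) =====
-- def has_n_adjacent_digits(number, n_digits=None):
--     """Streaming single pass: track the current run length; test each run as
--     it ends (and the final run after the loop)."""
--     s = str(number)
--     prev = s[0]
--     count = 1
--     for c in s[1:]:
--         if c == prev:
--             count += 1
--         else:
--             if (count == n_digits) if n_digits else (count > 1):
--                 return True
--             prev = c
--             count = 1
--     return (count == n_digits) if n_digits else (count > 1)
-- ===== Notes on version B (the rewrite author's own statement) =====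
-- stated objective: simpler
-- what changed: Replaces the build-a-list-of-run-strings pass plus a separate lengths list and any() scan with a single streaming pass keeping only a prev char and an integer run counter, testing each run as it closes with early return.
import Mathlib
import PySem

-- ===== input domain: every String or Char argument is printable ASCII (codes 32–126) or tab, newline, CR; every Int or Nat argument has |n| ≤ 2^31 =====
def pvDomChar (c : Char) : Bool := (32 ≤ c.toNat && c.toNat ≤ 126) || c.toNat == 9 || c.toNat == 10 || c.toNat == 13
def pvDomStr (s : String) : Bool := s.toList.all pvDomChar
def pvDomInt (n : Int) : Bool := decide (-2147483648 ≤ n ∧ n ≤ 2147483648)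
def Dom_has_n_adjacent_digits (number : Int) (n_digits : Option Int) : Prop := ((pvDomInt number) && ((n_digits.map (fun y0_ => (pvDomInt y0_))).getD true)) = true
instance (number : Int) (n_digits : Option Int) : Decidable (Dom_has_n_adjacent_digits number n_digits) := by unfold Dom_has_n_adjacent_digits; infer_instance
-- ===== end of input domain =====

-- ===== PORT A =====
-- A builds the list of maximal runs of equal characters of str(number),
-- then maps lengths and any()'s the chosen predicate.
def pvAStep (parts : List (List Char)) (i : Char) : List (List Char) :=
  match parts.getLast? with
  | none => parts ++ [[i]]
  | some lastPart =>
    if lastPart.getLast? = some i then parts.dropLast ++ [lastPart ++ [i]]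
    else parts ++ [[i]]

def has_n_adjacent_digits (number : Int) (n_digits : Option Int) : Bool :=
  let str_number := (PySem.Int.toStr number).toList
  let num_parts := str_number.foldl pvAStep []
  let num_part_lengths := num_parts.map (fun x => (x.length : Int))
  -- Python `if n_digits:` — truthy iff n_digits is a nonzero int
  match n_digits with
  | some d =>
    if d ≠ 0 then (num_part_lengths.map (fun x => x == d)).any id
    else (num_part_lengths.map (fun x => decide (x > 1))).any id
  | none => (num_part_lengths.map (fun x => decide (x > 1))).any id

-- ===== PORT B =====
-- B streams over the characters keeping (prev, count), testing each run as it closes.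
def pvBHit (n_digits : Option Int) (count : Int) : Bool :=
  match n_digits with
  | some d => if d ≠ 0 then count == d else count > 1
  | none => count > 1

def pvBLoop (n_digits : Option Int) : List Char → Char → Int → Bool
  | [], _, count => pvBHit n_digits count
  | c :: rest, prev, count =>
    if c = prev then pvBLoop n_digits rest prev (count + 1)
    else if pvBHit n_digits count then true
    else pvBLoop n_digits rest c 1

def has_n_adjacent_digits_alt (number : Int) (n_digits : Option Int) : Bool :=
  match (PySem.Int.toStr number).toList with
  | [] => false   -- unreachable: str(number) is never empty (totality guard)
  | p :: rest => pvBLoop n_digits rest p 1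

-- ===== PRECONDITION & SPEC =====
def Spec_has_n_adjacent_digits (number : Int) (n_digits : Option Int) (out : Bool) : Prop := out = has_n_adjacent_digits_alt number n_digits
instance (number : Int) (n_digits : Option Int) (out : Bool) : Decidable (Spec_has_n_adjacent_digits number n_digits out) := by unfold Spec_has_n_adjacent_digits; infer_instance

-- ===== CLAIM (what is proved, stated in full; the proofs are below) =====
def Claim_equal_has_n_adjacent_digits : Prop := ∀ (number : Int) (n_digits : Option Int), Dom_has_n_adjacent_digits number n_digits → Spec_has_n_adjacent_digits number n_digits (has_n_adjacent_digits number n_digits)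

-- ===== LEMMAS AND PROOFS =====

-- A's final branch equals any-map of pvBHit over the lengths
theorem pvA_select_eq (n_digits : Option Int) (lens : List Int) :
    (match n_digits with
     | some d =>
       if d ≠ 0 then (lens.map (fun x => x == d)).any id
       else (lens.map (fun x => decide (x > 1))).any id
     | none => (lens.map (fun x => decide (x > 1))).any id)
    = (lens.map (pvBHit n_digits)).any id := by
  cases n_digits with
  | none => rfl
  | some d =>
    dsimp only
    by_cases h : d = 0 <;>
      · simp only [h, ne_eq, not_true_eq_false, not_false_eq_true, if_false, if_true]
        first
        | rfl
        | (congr 1; exact List.map_congr_left (fun x _ => by simp [pvBHit, h]))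

-- the fold never touches an already-closed prefix (once there is a nonempty tail)
theorem pvAStep_append (done : List (List Char)) (parts : List (List Char))
    (h : parts ≠ []) (i : Char) :
    pvAStep (done ++ parts) i = done ++ pvAStep parts i := by
  obtain ⟨L, b, rfl⟩ := (List.eq_nil_or_concat parts).resolve_left h
  rw [List.concat_eq_append]
  unfold pvAStep
  simp only [← List.append_assoc, List.getLast?_append, List.getLast?_singleton,
    Option.some_or, List.dropLast_concat]
  split_ifs <;> simp

theorem pvAStep_ne_nil (parts : List (List Char)) (i : Char)
    (_h : parts ≠ []) : pvAStep parts i ≠ [] := by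
  unfold pvAStep
  cases hl : parts.getLast? with
  | none => simp
  | some lp => dsimp only; split_ifs <;> simp

theorem pvFold_append (l : List Char) (done parts : List (List Char))
    (h : parts ≠ []) :
    l.foldl pvAStep (done ++ parts) = done ++ l.foldl pvAStep parts ∧
    l.foldl pvAStep parts ≠ [] := by
  induction l generalizing parts with
  | nil => exact ⟨rfl, h⟩
  | cons c rest ih =>
    have hne := pvAStep_ne_nil parts c h
    have := ih (pvAStep parts c) hne
    simpa [List.foldl_cons, pvAStep_append done parts h c] using this

-- main invariant: A's tail-fold from a single open run equals B's streaming loop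
theorem pvMain (n_digits : Option Int) (rest : List Char) (run : List Char)
    (prev : Char) (hlast : run.getLast? = some prev) :
    ((((rest.foldl pvAStep [run]).map (fun x => (x.length : Int))).map (pvBHit n_digits)).any id)
      = pvBLoop n_digits rest prev (run.length : Int) := by
  induction rest generalizing run prev with
  | nil => simp [pvBLoop]
  | cons c rest ih =>
    have hrun : run ≠ [] := by
      intro h; rw [h] at hlast; simp at hlast
    by_cases hc : c = prev
    · have hstep : pvAStep [run] c = [run ++ [c]] := by
        unfold pvAStep; simp [hlast, hc]
      have hlast' : (run ++ [c]).getLast? = some prev := by simp [hc]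
      have hih := ih (run ++ [c]) prev hlast'
      have hlen : ((run ++ [c]).length : Int) = (run.length : Int) + 1 := by
        simp
      rw [hlen] at hih
      simp only [List.foldl_cons, hstep]
      rw [hih]
      simp [pvBLoop, hc]
    · have hstep : pvAStep [run] c = [run] ++ [[c]] := by
        unfold pvAStep; simp [hlast]
        intro h; exact absurd h.symm hc
      have hfold := pvFold_append rest [run] [[c]] (by simp)
      have hlc : ([c] : List Char).getLast? = some c := by simp
      have ihc := ih [c] c hlc
      simp only [List.foldl_cons, hstep, hfold.1]
      simp only [List.map_append, List.any_append, ihc]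
      by_cases hh : pvBHit n_digits (run.length : Int)
      · simp [pvBLoop, hc, hh]
      · simp [pvBLoop, hc, hh]

-- ===== VERDICT (by name: the statement is the Claim_ definition above) =====
theorem has_n_adjacent_digits_spec : Claim_equal_has_n_adjacent_digits := by
  intro number n_digits _
  unfold Spec_has_n_adjacent_digits has_n_adjacent_digits has_n_adjacent_digits_alt
  rw [pvA_select_eq]
  cases h : (PySem.Int.toStr number).toList with
  | nil => simp
  | cons p rest =>
    have hstep : pvAStep [] p = [[p]] := by unfold pvAStep; simp
    have hmain := pvMain n_digits rest [p] p (by simp)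
    simp only [List.foldl_cons, hstep]
    exact hmain
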